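-- pv_equiv track=rewrite | github.com/dnnijmlinn/Python-mooc-2021 | osa07-02_erikoismerkit/src/erikoismerkit.py | jaa_merkkeihin
-- ===== SOURCE A (Python) =====
-- from string import ascii_letters, punctuation
--
-- def jaa_merkkeihin(my_string: str):
--     first = ''
--     second = ''
--     third = ''
--     for character in my_string:
--         if character in ascii_letters:
--             first += character
--         elif character in punctuation:
--             second += character
--         else:
--             third += character
--     return (first, second, third)
-- ===== SOURCE B (Python) =====
-- from string import ascii_letters, punctuation
--
-- def jaa_merkkeihin(my_string: str):
--     first = ''.join(c for c in my_string if c in ascii_letters)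
--     second = ''.join(c for c in my_string if c in punctuation)
--     third = ''.join(c for c in my_string
--                     if c not in ascii_letters and c not in punctuation)
--     return (first, second, third)
-- ===== Notes on version B (the rewrite author's own statement) =====
-- stated objective: simpler
-- what changed: Replaces the single interleaved loop with three branching accumulators by three independent filtering passes over the string, one per bucket, each joined directly.
import Mathlib
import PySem

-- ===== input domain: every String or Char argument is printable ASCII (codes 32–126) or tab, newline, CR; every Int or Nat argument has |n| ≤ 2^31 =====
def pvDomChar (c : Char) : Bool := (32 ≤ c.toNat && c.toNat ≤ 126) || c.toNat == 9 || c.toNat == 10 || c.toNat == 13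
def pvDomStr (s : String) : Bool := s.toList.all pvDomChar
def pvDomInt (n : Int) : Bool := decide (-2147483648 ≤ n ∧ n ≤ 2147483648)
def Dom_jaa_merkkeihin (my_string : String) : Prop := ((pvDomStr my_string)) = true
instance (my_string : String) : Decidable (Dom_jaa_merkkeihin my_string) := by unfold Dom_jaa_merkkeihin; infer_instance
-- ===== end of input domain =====

-- B replaces A's single interleaved accumulating loop by three independent filtering passes, one per bucket (objective: simpler).


-- string.ascii_letters and string.punctuation as lists of characters (exact)
def pvAsciiLetters : List Char := "abcdefghijklmnopqrstuvwxyzABCDEFGHIJKLMNOPQRSTUVWXYZ".toList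
def pvPunctuation : List Char := "!\"#$%&'()*+,-./:;<=>?@[\\]^_`{|}~".toList

-- ===== PORT A =====
-- one left fold over the characters carrying the three accumulators, branches in A's order
def pvStepA (acc : List Char × List Char × List Char) (character : Char) :
    List Char × List Char × List Char :=
  let (first, second, third) := acc
  if pvAsciiLetters.contains character then (first ++ [character], second, third)
  else if pvPunctuation.contains character then (first, second ++ [character], third)
  else (first, second, third ++ [character])

def jaa_merkkeihin (my_string : String) : String × String × String :=
  let (first, second, third) := my_string.toList.foldl pvStepA ([], [], [])
  (String.ofList first, String.ofList second, String.ofList third)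

-- ===== PORT B =====
-- three independent filtering passes, one per bucket
def jaa_merkkeihin_alt (my_string : String) : String × String × String :=
  let cs := my_string.toList
  let first := String.ofList (cs.filter (fun c => pvAsciiLetters.contains c))
  let second := String.ofList (cs.filter (fun c => pvPunctuation.contains c))
  let third := String.ofList (cs.filter (fun c =>
    !pvAsciiLetters.contains c && !pvPunctuation.contains c))
  (first, second, third)

-- ===== PRECONDITION & SPEC =====
def Spec_jaa_merkkeihin (my_string : String) (out : String × String × String) : Prop := out = jaa_merkkeihin_alt my_string
instance (my_string : String) (out : String × String × String) : Decidable (Spec_jaa_merkkeihin my_string out) := by unfold Spec_jaa_merkkeihin; infer_instance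

-- ===== CLAIM (what is proved, stated in full; the proofs are below) =====
def Claim_equal_jaa_merkkeihin : Prop := ∀ (my_string : String), Dom_jaa_merkkeihin my_string → Spec_jaa_merkkeihin my_string (jaa_merkkeihin my_string)

-- ===== LEMMAS AND PROOFS =====
theorem jaa_letters_not_punct {c : Char} (h : pvAsciiLetters.contains c = true) :
    pvPunctuation.contains c = false := by
  have hall : pvAsciiLetters.all (fun c => !pvPunctuation.contains c) = true := by decide
  have := List.all_eq_true.mp hall c (List.contains_iff_mem.mp h)
  simpa using this

theorem jaa_fold_inv (l a b c : List Char) :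
    l.foldl pvStepA (a, b, c)
    = (a ++ l.filter (fun ch => pvAsciiLetters.contains ch),
       b ++ l.filter (fun ch => pvPunctuation.contains ch),
       c ++ l.filter (fun ch => !pvAsciiLetters.contains ch && !pvPunctuation.contains ch)) := by
  induction l generalizing a b c with
  | nil => simp
  | cons x xs ih =>
    rw [List.foldl_cons]
    by_cases h1 : pvAsciiLetters.contains x = true
    · have h2 := jaa_letters_not_punct h1
      rw [show pvStepA (a, b, c) x = (a ++ [x], b, c) by
            simp only [pvStepA]; rw [if_pos h1], ih]
      have m1 : x ∈ pvAsciiLetters := List.contains_iff_mem.mp h1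
      have m2 : x ∉ pvPunctuation := by simpa [List.contains_iff_mem] using h2
      simp [List.filter_cons, m1, m2]
    · by_cases h2 : pvPunctuation.contains x = true
      · rw [show pvStepA (a, b, c) x = (a, b ++ [x], c) by
              simp only [pvStepA]; rw [if_neg h1, if_pos h2], ih]
        have m1 : x ∉ pvAsciiLetters := by simpa [List.contains_iff_mem] using h1
        have m2 : x ∈ pvPunctuation := List.contains_iff_mem.mp h2
        simp [List.filter_cons, m1, m2]
      · rw [show pvStepA (a, b, c) x = (a, b, c ++ [x]) by
              simp only [pvStepA]; rw [if_neg h1, if_neg h2], ih]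
        have m1 : x ∉ pvAsciiLetters := by simpa [List.contains_iff_mem] using h1
        have m2 : x ∉ pvPunctuation := by simpa [List.contains_iff_mem] using h2
        simp [List.filter_cons, m1, m2]


-- ===== VERDICT (by name: the statement is the Claim_ definition above) =====
theorem jaa_merkkeihin_spec : Claim_equal_jaa_merkkeihin := by
  intro s _
  unfold Spec_jaa_merkkeihin jaa_merkkeihin jaa_merkkeihin_alt
  rw [jaa_fold_inv]
  simp
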